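-- pv_equiv track=rewrite | github.com/chebis125/Retos-desarrollador-jr-fullstack | Reto2.py | cuadrados_ordenados
-- ===== SOURCE A (Python) =====
-- def cuadrados_ordenados(matriz, S):
--     SS = S*11
--     # Ordenar la matriz de entrada usando ordenación por inserción
--     for i in range(1, len(matriz)):
--         clave = matriz[i]
--         j = i-1
--         while j >=0 and clave < matriz[j]:
--             matriz[j+1] = matriz[j]
--             j -= 1
--         matriz[j+1] = clave
--     # Calcular el cuadrado y filtrar
--     cuadrados_filtrados = [x**2 for x in matriz if 0 <= x**2 <= SS]
--     for i in range(1, len(cuadrados_filtrados)):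
--         clave = cuadrados_filtrados[i]
--         j = i-1
--         while j >=0 and clave < cuadrados_filtrados[j]:
--             cuadrados_filtrados[j+1] = cuadrados_filtrados[j]
--             j -= 1
--         cuadrados_filtrados[j+1] = clave
--     return cuadrados_filtrados
-- ===== SOURCE B (Python) =====
-- def cuadrados_ordenados(matriz, S):
--     # Sort matriz in place (same observable side effect as A's insertion sort),
--     # then consume the sorted list from both ends, emitting the larger square
--     # first and prepending, so the result comes out already in ascending order.
--     matriz.sort()
--     limite = 11 * S
--     restante = list(matriz)
--     res = []
--     while restante:
--         a = restante[0] ** 2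
--         b = restante[-1] ** 2
--         if b <= a:
--             x = a
--             restante = restante[1:]
--         else:
--             x = b
--             restante = restante[:-1]
--         if x <= limite:
--             res = [x] + res
--     return res
-- ===== Notes on version B (the rewrite author's own statement) =====
-- stated objective: faster
-- what changed: Instead of squaring everything and insertion-sorting the squares, B sorts matriz once (built-in sort, preserving A's in-place-sort side effect) and then emits squares in order by a two-ended merge of the sorted list (largest remaining square is always at one of the two ends), prepending each in-limit square so the result is built already ascending.
import Mathlib
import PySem

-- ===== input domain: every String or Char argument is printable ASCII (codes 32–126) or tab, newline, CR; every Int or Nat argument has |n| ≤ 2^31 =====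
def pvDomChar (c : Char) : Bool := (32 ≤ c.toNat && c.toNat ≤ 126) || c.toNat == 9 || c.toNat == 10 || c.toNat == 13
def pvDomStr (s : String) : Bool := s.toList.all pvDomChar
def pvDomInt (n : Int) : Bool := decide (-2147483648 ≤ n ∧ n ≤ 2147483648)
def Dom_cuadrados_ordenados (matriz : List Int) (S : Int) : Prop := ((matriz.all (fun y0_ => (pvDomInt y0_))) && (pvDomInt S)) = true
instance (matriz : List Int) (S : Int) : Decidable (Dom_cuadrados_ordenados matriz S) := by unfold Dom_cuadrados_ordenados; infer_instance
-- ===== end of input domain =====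

-- B sorts matriz once and emits the squares from the two ends of the sorted list, already in
-- ascending order (one linear emission pass replaces A's second insertion sort); equivalence is
-- about the RETURN value — both A and B also leave matriz sorted in place (same side effect).

-- ===== PORT A =====
-- inner while-loop of A's insertion sort; k plays the role of j+1 (j >= 0 <-> k >= 1),
-- so every read/write index is a Nat; all indices are in range, so `getD _ 0` is exact
def pvInner (clave : Int) : List Int → Nat → List Int
  | m, 0 => m.set 0 clave
  | m, k+1 =>
    if clave < m.getD k 0 then pvInner clave (m.set (k+1) (m.getD k 0)) k
    else m.set (k+1) clave

-- one full `for i in range(1, len(l)):` insertion-sort pass (A's code runs this loop twice);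
-- range(1, len(l)) ported as List.range' 1 (l.length - 1): the same nonnegative indices
def pvInsSort (l : List Int) : List Int :=
  (List.range' 1 (l.length - 1)).foldl (fun m i => pvInner (m.getD i 0) m i) l

def cuadrados_ordenados (matriz : List Int) (S : Int) : List Int :=
  let SS := S * 11
  let m := pvInsSort matriz
  let cuadrados_filtrados := (m.filter (fun x => decide (0 ≤ x ^ 2 ∧ x ^ 2 ≤ SS))).map (fun x => x ^ 2)
  pvInsSort cuadrados_filtrados

-- ===== PORT B =====
-- Source B's `while restante:` loop: compare the squares of the two ends, drop the end whose
-- square is not smaller, and prepend that square to res when it is within the limit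
def pvMerge (limite : Int) : List Int → List Int → List Int
  | [], res => res
  | h :: t, res =>
    let a := h ^ 2
    let b := ((h :: t).getLast (List.cons_ne_nil h t)) ^ 2
    if b ≤ a then pvMerge limite t (if a ≤ limite then a :: res else res)
    else pvMerge limite ((h :: t).dropLast) (if b ≤ limite then b :: res else res)
termination_by r _ => r.length
decreasing_by
  · simp
  · simp [List.length_dropLast]

def cuadrados_ordenados_alt (matriz : List Int) (S : Int) : List Int :=
  let m := PySem.List.sorted matriz (fun x => x) false   -- matriz.sort()
  let limite := 11 * S
  pvMerge limite m []

-- ===== PRECONDITION & SPEC =====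
def Spec_cuadrados_ordenados (matriz : List Int) (S : Int) (out : List Int) : Prop := out = cuadrados_ordenados_alt matriz S
instance (matriz : List Int) (S : Int) (out : List Int) : Decidable (Spec_cuadrados_ordenados matriz S out) := by unfold Spec_cuadrados_ordenados; infer_instance

-- ===== CLAIM (what is proved, stated in full; the proofs are below) =====
def Claim_equal_cuadrados_ordenados : Prop := ∀ (matriz : List Int) (S : Int), Dom_cuadrados_ordenados matriz S → Spec_cuadrados_ordenados matriz S (cuadrados_ordenados matriz S)

-- ===== LEMMAS AND PROOFS =====

-- abstract "insert x after all elements ≤ x" — what A's inner while-loop amounts to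
def insPy (x : Int) : List Int → List Int
  | [] => [x]
  | y :: l => if y ≤ x then y :: insPy x l else x :: y :: l

theorem insPy_append_last (x q : Int) (hq : ¬ q ≤ x) (Q : List Int) :
    insPy x (Q ++ [q]) = insPy x Q ++ [q] := by
  induction Q with
  | nil => simp [insPy, hq]
  | cons y Q ih => by_cases h : y ≤ x <;> simp [insPy, h, ih]

theorem insPy_all_le (x : Int) (L : List Int) (h : ∀ y ∈ L, y ≤ x) :
    insPy x L = L ++ [x] := by
  induction L with
  | nil => simp [insPy]
  | cons y L ih =>
    have hy : y ≤ x := h y (by simp)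
    simp [insPy, hy, ih (fun z hz => h z (by simp [hz]))]

theorem insPy_perm (x : Int) (L : List Int) : (insPy x L).Perm (x :: L) := by
  induction L with
  | nil => simp [insPy]
  | cons y L ih =>
    by_cases h : y ≤ x
    · simpa [insPy, h] using (ih.cons y).trans (List.Perm.swap x y L)
    · simp [insPy, h]

theorem insPy_pairwise (x : Int) (L : List Int) (h : L.Pairwise (· ≤ ·)) :
    (insPy x L).Pairwise (· ≤ ·) := by
  induction L with
  | nil => simp [insPy]
  | cons y L ih =>
    rcases List.pairwise_cons.1 h with ⟨hy, hL⟩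
    by_cases hyx : y ≤ x
    · have hrw : insPy x (y :: L) = y :: insPy x L := by simp [insPy, hyx]
      rw [hrw]
      refine List.pairwise_cons.2 ⟨?_, ih hL⟩
      intro z hz
      rcases List.mem_cons.1 (((insPy_perm x L).mem_iff).1 hz) with rfl | h1
      · exact hyx
      · exact hy z h1
    · have hrw : insPy x (y :: L) = x :: y :: L := by simp [insPy, hyx]
      rw [hrw]
      have hxy : x ≤ y := by omega
      refine List.pairwise_cons.2 ⟨?_, h⟩
      intro z hz
      rcases List.mem_cons.1 hz with rfl | h1
      · exact hxy
      · exact hxy.trans (hy z h1)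

theorem insPy_length (x : Int) (L : List Int) : (insPy x L).length = L.length + 1 := by
  induction L with
  | nil => rfl
  | cons y L ih => by_cases h : y ≤ x <;> simp [insPy, h, ih]

-- list surgery at a known offset
theorem set_at_len (Q : List Int) (d : Int) (T : List Int) (x : Int) :
    (Q ++ d :: T).set Q.length x = Q ++ x :: T := by
  induction Q with
  | nil => rfl
  | cons a Q ih => simp [ih]

theorem getD_at_len (Q : List Int) (d : Int) (T : List Int) :
    (Q ++ d :: T).getD Q.length 0 = d := by
  induction Q with
  | nil => rfl
  | cons a Q ih => simpa using ih

theorem pvInner_spec (Q : List Int) (d : Int) (T : List Int) (x : Int) :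
    Q.Pairwise (· ≤ ·) → pvInner x (Q ++ d :: T) Q.length = insPy x Q ++ T := by
  induction Q using List.reverseRecOn generalizing d T with
  | nil => intro _; simp [pvInner, insPy]
  | append_singleton Q' q ih =>
    intro hQ
    have hQ' : Q'.Pairwise (· ≤ ·) := (List.pairwise_append.1 hQ).1
    have hlen : (Q' ++ [q]).length = Q'.length + 1 := by simp
    rw [hlen]
    have hget : ((Q' ++ [q]) ++ d :: T).getD Q'.length 0 = q := by
      rw [List.append_assoc]; simpa using getD_at_len Q' q (d :: T)
    by_cases hx : x < q
    · have hset : ((Q' ++ [q]) ++ d :: T).set (Q'.length + 1) q = Q' ++ q :: q :: T := by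
        have h1 := set_at_len (Q' ++ [q]) d T q
        simp at h1
        simpa [List.append_assoc] using h1
      simp only [pvInner, hget, if_pos hx, hset]
      rw [ih q (q :: T) hQ', insPy_append_last x q (by omega) Q']
      simp
    · have hset : ((Q' ++ [q]) ++ d :: T).set (Q'.length + 1) x = Q' ++ q :: x :: T := by
        have h1 := set_at_len (Q' ++ [q]) d T x
        simp at h1
        simpa [List.append_assoc] using h1
      have hall : ∀ y ∈ Q' ++ [q], y ≤ x := by
        intro y hy
        rcases List.mem_append.1 hy with h1 | h1
        · have hyq : y ≤ q := (List.pairwise_append.1 hQ).2.2 y h1 q (by simp)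
          omega
        · simp at h1; omega
      simp only [pvInner, hget, if_neg hx, hset]
      rw [insPy_all_le x (Q' ++ [q]) hall]
      simp

theorem pvSort_loop (Sfx : List Int) : ∀ P : List Int, P.Pairwise (· ≤ ·) →
    (List.range' P.length Sfx.length).foldl (fun m i => pvInner (m.getD i 0) m i) (P ++ Sfx)
      = Sfx.foldl (fun acc x => insPy x acc) P := by
  induction Sfx with
  | nil => intro P hP; simp
  | cons s S' ih =>
    intro P hP
    simp only [List.length_cons]
    rw [List.range'_succ]
    simp only [List.foldl_cons]
    rw [getD_at_len P s S', pvInner_spec P s S' s hP]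
    have h2 := ih (insPy s P) (insPy_pairwise s P hP)
    rw [insPy_length] at h2
    exact h2

theorem pvInsSort_eq (l : List Int) :
    pvInsSort l = (match l with
      | [] => []
      | h :: t => t.foldl (fun acc x => insPy x acc) [h]) := by
  match l with
  | [] => rfl
  | h :: t =>
    show pvInsSort (h :: t) = t.foldl (fun acc x => insPy x acc) [h]
    unfold pvInsSort
    have hl : (h :: t).length - 1 = t.length := by simp
    rw [hl]
    have := pvSort_loop t [h] (by simp)
    simpa using this

theorem insFold_perm (L : List Int) : ∀ P : List Int,
    (L.foldl (fun acc x => insPy x acc) P).Perm (P ++ L) := by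
  induction L with
  | nil => intro P; simp
  | cons x L ih =>
    intro P
    simp only [List.foldl_cons]
    refine (ih (insPy x P)).trans ?_
    refine ((insPy_perm x P).append_right L).trans ?_
    simpa using List.perm_middle.symm

theorem insFold_pairwise (L : List Int) : ∀ P : List Int, P.Pairwise (· ≤ ·) →
    (L.foldl (fun acc x => insPy x acc) P).Pairwise (· ≤ ·) := by
  induction L with
  | nil => intro P hP; simpa
  | cons x L ih => intro P hP; exact ih _ (insPy_pairwise x P hP)

theorem pvInsSort_perm (l : List Int) : (pvInsSort l).Perm l := by
  rw [pvInsSort_eq]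
  match l with
  | [] => rfl
  | h :: t => simpa using insFold_perm t [h]

theorem pvInsSort_pairwise (l : List Int) : (pvInsSort l).Pairwise (· ≤ ·) := by
  rw [pvInsSort_eq]
  match l with
  | [] => simp
  | h :: t => exact insFold_pairwise t [h] (by simp)

theorem pairwise_le_getLast : ∀ (l : List Int) (hl : l ≠ []), l.Pairwise (· ≤ ·) →
    ∀ y ∈ l, y ≤ l.getLast hl := by
  intro l
  induction l with
  | nil => simp
  | cons a t ih =>
    intro _ hp y hy
    rcases List.mem_cons.1 hy with rfl | hyt
    · cases t with
      | nil => simp [List.getLast]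
      | cons b t' =>
        have hab : y ≤ (b :: t').getLast (by simp) :=
          (List.pairwise_cons.1 hp).1 _ (List.getLast_mem _)
        simpa [List.getLast_cons] using hab
    · cases t with
      | nil => simp at hyt
      | cons b t' =>
        have := ih (by simp) (List.pairwise_cons.1 hp).2 y hyt
        simpa [List.getLast_cons] using this

theorem pvMerge_spec (limite : Int) : ∀ (n : Nat) (m : List Int), m.length = n → m.Pairwise (· ≤ ·) →
    ∀ res : List Int, ∃ C : List Int,
      pvMerge limite m res = C ++ res ∧
      C.Perm ((m.map (fun x => x ^ 2)).filter (fun y => decide (y ≤ limite))) ∧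
      C.Pairwise (· ≤ ·) := by
  intro n
  induction n with
  | zero =>
    intro m hm _ res
    rw [List.length_eq_zero_iff] at hm; subst hm
    exact ⟨[], by simp [pvMerge], by simp, by simp⟩
  | succ n ih =>
    intro m hm hp res
    cases m with
    | nil => simp at hm
    | cons h t =>
      have hlt : t.length = n := by simpa using hm
      set L := (h :: t).getLast (List.cons_ne_nil h t) with hLdef
      have hmem : ∀ y ∈ h :: t, h ≤ y ∧ y ≤ L := by
        intro y hy
        refine ⟨?_, pairwise_le_getLast _ _ hp y hy⟩
        rcases List.mem_cons.1 hy with rfl | hyt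
        · exact le_refl y
        · exact (List.pairwise_cons.1 hp).1 y hyt
      by_cases hba : L ^ 2 ≤ h ^ 2
      · -- drop the head; emitted square is h^2
        have hmax : ∀ y ∈ h :: t, y ^ 2 ≤ h ^ 2 := by
          intro y hy; obtain ⟨h1, h2⟩ := hmem y hy
          by_cases hy0 : 0 ≤ y
          · nlinarith
          · nlinarith
        obtain ⟨C', heq, hperm, hpw⟩ :=
          ih t hlt (List.Pairwise.of_cons hp) (if h ^ 2 ≤ limite then h ^ 2 :: res else res)
        have hub : ∀ c ∈ C', c ≤ h ^ 2 := by
          intro c hc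
          have hc4 := List.mem_of_mem_filter ((hperm.mem_iff).1 hc)
          obtain ⟨y, hy, rfl⟩ := List.mem_map.1 hc4
          exact hmax y (List.mem_cons_of_mem h hy)
        have hstep : pvMerge limite (h :: t) res
            = pvMerge limite t (if h ^ 2 ≤ limite then h ^ 2 :: res else res) := by
          rw [pvMerge]; simp only [← hLdef, if_pos hba]
        by_cases hal : h ^ 2 ≤ limite
        · rw [if_pos hal] at heq
          refine ⟨C' ++ [h ^ 2], ?_, ?_, ?_⟩
          · rw [hstep, if_pos hal, heq]; simp
          · have hf : ((h :: t).map (fun x => x ^ 2)).filter (fun y => decide (y ≤ limite))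
                = h ^ 2 :: (t.map (fun x => x ^ 2)).filter (fun y => decide (y ≤ limite)) := by
              simp [hal]
            rw [hf]
            exact (List.perm_append_singleton _ _).trans (hperm.cons _)
          · refine List.pairwise_append.2 ⟨hpw, by simp, ?_⟩
            intro c hc b hb
            rw [List.mem_singleton] at hb; subst hb
            exact hub c hc
        · rw [if_neg hal] at heq
          refine ⟨C', ?_, ?_, hpw⟩
          · rw [hstep, if_neg hal, heq]
          · have hf : ((h :: t).map (fun x => x ^ 2)).filter (fun y => decide (y ≤ limite))
                = (t.map (fun x => x ^ 2)).filter (fun y => decide (y ≤ limite)) := by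
              simp [hal]
            rw [hf]; exact hperm
      · -- drop the last; emitted square is L^2
        have hab : h ^ 2 ≤ L ^ 2 := by omega
        have hsplit : (h :: t).dropLast ++ [L] = h :: t :=
          List.dropLast_append_getLast (List.cons_ne_nil h t)
        have hm' : ((h :: t).dropLast).length = n := by
          simp [List.length_dropLast]; omega
        have hp' : ((h :: t).dropLast).Pairwise (· ≤ ·) :=
          hp.sublist (List.dropLast_sublist _)
        have hmax : ∀ y ∈ (h :: t).dropLast, y ^ 2 ≤ L ^ 2 := by
          intro y hy
          have hym : y ∈ h :: t := (List.dropLast_sublist _).mem hy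
          obtain ⟨h1, h2⟩ := hmem y hym
          by_cases hy0 : 0 ≤ y
          · nlinarith
          · nlinarith
        obtain ⟨C', heq, hperm, hpw⟩ :=
          ih _ hm' hp' (if L ^ 2 ≤ limite then L ^ 2 :: res else res)
        have hub : ∀ c ∈ C', c ≤ L ^ 2 := by
          intro c hc
          have hc4 := List.mem_of_mem_filter ((hperm.mem_iff).1 hc)
          obtain ⟨y, hy, rfl⟩ := List.mem_map.1 hc4
          exact hmax y hy
        have hstep : pvMerge limite (h :: t) res
            = pvMerge limite ((h :: t).dropLast) (if L ^ 2 ≤ limite then L ^ 2 :: res else res) := by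
          rw [pvMerge]; simp only [← hLdef, if_neg hba]
        have hfl : (h :: t).map (fun x => x ^ 2)
            = ((h :: t).dropLast).map (fun x => x ^ 2) ++ [L ^ 2] := by
          conv_lhs => rw [← hsplit]
          simp
        by_cases hal : L ^ 2 ≤ limite
        · rw [if_pos hal] at heq
          refine ⟨C' ++ [L ^ 2], ?_, ?_, ?_⟩
          · rw [hstep, if_pos hal, heq]; simp
          · rw [hfl, List.filter_append]
            have hone : List.filter (fun y => decide (y ≤ limite)) [L ^ 2] = [L ^ 2] := by simp [hal]
            rw [hone]
            exact hperm.append (List.Perm.refl _)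
          · refine List.pairwise_append.2 ⟨hpw, by simp, ?_⟩
            intro c hc b hb
            rw [List.mem_singleton] at hb; subst hb
            exact hub c hc
        · rw [if_neg hal] at heq
          refine ⟨C', ?_, ?_, hpw⟩
          · rw [hstep, if_neg hal, heq]
          · rw [hfl, List.filter_append]
            have hone : List.filter (fun y => decide (y ≤ limite)) [L ^ 2] = [] := by simp [hal]
            rw [hone]; simpa using hperm

-- ===== VERDICT (by name: the statement is the Claim_ definition above) =====
theorem cuadrados_ordenados_spec : Claim_equal_cuadrados_ordenados := by
  intro matriz S _
  show cuadrados_ordenados matriz S = cuadrados_ordenados_alt matriz S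
  unfold cuadrados_ordenados cuadrados_ordenados_alt
  simp only []
  set mB := PySem.List.sorted matriz (fun x => x) false with hmB
  have hBperm : mB.Perm matriz := PySem.List.sorted_perm matriz (fun x => x) false
  have hBpw : mB.Pairwise (· ≤ ·) := PySem.List.sorted_pairwise matriz (fun x => x)
  obtain ⟨C, heq, hperm, hpw⟩ := pvMerge_spec (11 * S) mB.length mB rfl hBpw []
  rw [heq, List.append_nil]
  -- the A side
  set mA := pvInsSort matriz with hmA
  set cf := (mA.filter (fun x => decide (0 ≤ x ^ 2 ∧ x ^ 2 ≤ S * 11))).map (fun x => x ^ 2) with hcf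
  have hApw : (pvInsSort cf).Pairwise (· ≤ ·) := pvInsSort_pairwise cf
  have hAperm : (pvInsSort cf).Perm cf := pvInsSort_perm cf
  -- cf is a permutation of C's multiset
  have hqa : mA.filter (fun x => decide (0 ≤ x ^ 2 ∧ x ^ 2 ≤ S * 11))
      = mA.filter (fun x => decide (x ^ 2 ≤ 11 * S)) := by
    refine List.filter_congr ?_
    intro x _
    have := sq_nonneg x
    simp only [decide_eq_decide]
    constructor
    · rintro ⟨_, h⟩; omega
    · intro h; refine ⟨by positivity, by omega⟩
  have hmap : cf = (mA.map (fun x => x ^ 2)).filter (fun y => decide (y ≤ 11 * S)) := by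
    rw [hcf, hqa, List.filter_map]
    rfl
  have hAX : (pvInsSort cf).Perm ((mB.map (fun x => x ^ 2)).filter (fun y => decide (y ≤ 11 * S))) := by
    refine hAperm.trans ?_
    rw [hmap]
    exact ((((pvInsSort_perm matriz).trans hBperm.symm)).map _).filter _
  have e1 := PySem.List.sorted_id_eq_of_perm_of_pairwise
      ((mB.map (fun x => x ^ 2)).filter (fun y => decide (y ≤ 11 * S))) _ hAX hApw
  have e2 := PySem.List.sorted_id_eq_of_perm_of_pairwise
      ((mB.map (fun x => x ^ 2)).filter (fun y => decide (y ≤ 11 * S))) _ hperm hpw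
  rw [← e1, ← e2]
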